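-- pv_equiv track=rewrite | github.com/oliveramezquita/api_sataiga | api/helpers/unique_colors.py | unique_colors
-- ===== SOURCE A (Python) =====
-- from typing import Any, Dict, List
--
-- def unique_colors(data: List[Dict[str, Any]]) -> List[str]:
--     unique = {
--         part.strip()
--         for item in data
--         for part in item.get("name", "").split("/")
--         if part.strip()
--     }
--     return sorted(unique)
-- ===== SOURCE B (Python) =====
-- def unique_colors(data):
--     parts = []
--     for item in data:
--         for part in item.get("name", "").split("/"):
--             p = part.strip()
--             if p:
--                 parts.append(p)
--     result = []
--     for p in sorted(parts):
--         if not result or result[-1] != p: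
--             result.append(p)
--     return result
-- ===== Notes on version B (the rewrite author's own statement) =====
-- stated objective: alternative
-- what changed: Replaces the set comprehension + sorted(set) with a plain list collection, a sort, and a recursive adjacency-deduplication pass over the sorted list.
import Mathlib
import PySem

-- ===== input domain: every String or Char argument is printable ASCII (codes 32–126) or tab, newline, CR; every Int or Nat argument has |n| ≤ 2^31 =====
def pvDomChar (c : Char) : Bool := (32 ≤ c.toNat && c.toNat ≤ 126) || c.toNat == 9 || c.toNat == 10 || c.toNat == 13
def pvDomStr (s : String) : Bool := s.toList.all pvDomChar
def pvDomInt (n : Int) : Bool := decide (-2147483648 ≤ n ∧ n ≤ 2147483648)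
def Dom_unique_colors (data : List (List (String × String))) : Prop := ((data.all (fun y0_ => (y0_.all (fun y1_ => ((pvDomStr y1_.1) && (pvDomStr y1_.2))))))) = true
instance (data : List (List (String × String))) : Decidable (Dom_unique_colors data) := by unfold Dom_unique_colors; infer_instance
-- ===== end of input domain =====

-- B collects the stripped non-empty parts into a plain list, sorts it, and removes
-- adjacent duplicates in one walk, instead of A's set comprehension + sorted(set).

-- ===== PORT A =====
-- ("/" is a nonempty separator, so Str.split? is always `some`; `.getD []` only makes it total)
def unique_colors (data : List (List (String × String))) : List String :=
  let unique : PySem.Set String :=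
    data.foldl (fun s item =>
      ((PySem.Str.split? (PySem.Dict.getD (PySem.Dict.mk item) "name" "") "/").getD []).foldl
        (fun s part =>
          if PySem.Str.strip part ≠ "" then PySem.Set.add s (PySem.Str.strip part) else s)
        s)
      PySem.Set.empty
  PySem.List.sorted unique (fun x => x) false

-- ===== PORT B =====
-- one step of B's dedup loop: 'if not result or result[-1] != p: result.append(p)'
def dedupStep (result : List String) (p : String) : List String :=
  if result = [] ∨ result.getLast? ≠ some p then result ++ [p] else result

def unique_colors_alt (data : List (List (String × String))) : List String :=
  let parts : List String :=
    data.foldl (fun acc item =>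
      ((PySem.Str.split? (PySem.Dict.getD (PySem.Dict.mk item) "name" "") "/").getD []).foldl
        (fun acc part =>
          let p := PySem.Str.strip part
          if p ≠ "" then acc ++ [p] else acc)
        acc)
      []
  (PySem.List.sorted parts (fun x => x) false).foldl dedupStep []

-- ===== PRECONDITION & SPEC =====
def Spec_unique_colors (data : List (List (String × String))) (out : List String) : Prop := out = unique_colors_alt data
instance (data : List (List (String × String))) (out : List String) : Decidable (Spec_unique_colors data out) := by unfold Spec_unique_colors; infer_instance

-- ===== CLAIM (what is proved, stated in full; the proofs are below) =====
def Claim_equal_unique_colors : Prop := ∀ (data : List (List (String × String))), Dom_unique_colors data → Spec_unique_colors data (unique_colors data)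

-- ===== LEMMAS AND PROOFS =====

-- the parts generated by one item
def pvParts (item : List (String × String)) : List String :=
  (((PySem.Str.split? (PySem.Dict.getD (PySem.Dict.mk item) "name" "") "/").getD []).filter
    (fun part => PySem.Str.strip part ≠ "")).map PySem.Str.strip

lemma a_inner (item : List (String × String)) (s : PySem.Set String) :
    ((PySem.Str.split? (PySem.Dict.getD (PySem.Dict.mk item) "name" "") "/").getD []).foldl
      (fun s part =>
        if PySem.Str.strip part ≠ "" then PySem.Set.add s (PySem.Str.strip part) else s) s
      = PySem.Set.update s (pvParts item) := by
  rw [PySem.List.foldl_ite_eq_foldl_filter, ← PySem.Set.update_map_eq_foldl_add]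
  rfl

lemma a_outer (data : List (List (String × String))) (s : PySem.Set String) :
    data.foldl (fun s item =>
      ((PySem.Str.split? (PySem.Dict.getD (PySem.Dict.mk item) "name" "") "/").getD []).foldl
        (fun s part =>
          if PySem.Str.strip part ≠ "" then PySem.Set.add s (PySem.Str.strip part) else s) s) s
      = PySem.Set.update s (data.flatMap pvParts) := by
  induction data generalizing s with
  | nil => rfl
  | cons item rest ih =>
      rw [List.foldl_cons, a_inner, ih, List.flatMap_cons, PySem.Set.update_append]

lemma b_inner (item : List (String × String)) (acc : List String) :
    ((PySem.Str.split? (PySem.Dict.getD (PySem.Dict.mk item) "name" "") "/").getD []).foldl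
      (fun acc part =>
        let p := PySem.Str.strip part
        if p ≠ "" then acc ++ [p] else acc) acc
      = acc ++ pvParts item := by
  show ((PySem.Str.split? (PySem.Dict.getD (PySem.Dict.mk item) "name" "") "/").getD []).foldl
      (fun acc part => if PySem.Str.strip part ≠ "" then acc ++ [PySem.Str.strip part] else acc) acc
      = acc ++ pvParts item
  rw [PySem.List.foldl_ite_eq_foldl_filter, PySem.List.foldl_append_singleton_eq_map]
  rfl

lemma b_outer (data : List (List (String × String))) (acc : List String) :
    data.foldl (fun acc item =>
      ((PySem.Str.split? (PySem.Dict.getD (PySem.Dict.mk item) "name" "") "/").getD []).foldl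
        (fun acc part =>
          let p := PySem.Str.strip part
          if p ≠ "" then acc ++ [p] else acc) acc) acc
      = acc ++ data.flatMap pvParts := by
  induction data generalizing acc with
  | nil => simp
  | cons item rest ih =>
      rw [List.foldl_cons, b_inner, ih, List.flatMap_cons, List.append_assoc]

-- proof-side recursive view of B's adjacency-dedup loop
def dedupAdjacent : List String → List String
  | [] => []
  | [x] => [x]
  | x :: y :: t => if x = y then dedupAdjacent (y :: t) else x :: dedupAdjacent (y :: t)

lemma mem_dedupAdjacent (x : String) (l : List String) :
    x ∈ dedupAdjacent l ↔ x ∈ l := by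
  induction l using dedupAdjacent.induct with
  | case1 => simp [dedupAdjacent]
  | case2 y => simp [dedupAdjacent]
  | case3 a t ih =>
      show x ∈ (if a = a then dedupAdjacent (a :: t) else a :: dedupAdjacent (a :: t)) ↔ _
      rw [if_pos rfl, ih]
      simp
  | case4 a b t hab ih =>
      simp only [dedupAdjacent, if_neg hab]
      simp [ih]

lemma pairwise_lt_dedupAdjacent (l : List String) (h : l.Pairwise (· ≤ ·)) :
    (dedupAdjacent l).Pairwise (· < ·) := by
  induction l using dedupAdjacent.induct with
  | case1 => exact List.Pairwise.nil
  | case2 y => simp [dedupAdjacent]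
  | case3 a t ih =>
      rw [dedupAdjacent, if_pos rfl]
      exact ih h.tail
  | case4 a b t hab ih =>
      rw [dedupAdjacent, if_neg hab]
      refine List.pairwise_cons.mpr ⟨?_, ih h.tail⟩
      intro z hz
      have hz' : z ∈ b :: t := (mem_dedupAdjacent z (b :: t)).mp hz
      have hle : a ≤ z := (List.pairwise_cons.mp h).1 z hz'
      rcases List.mem_cons.mp hz' with hzb | hzt
      · exact hzb ▸ lt_of_le_of_ne ((List.pairwise_cons.mp h).1 b (List.mem_cons_self ..)) hab
      · have hb : a ≤ b := (List.pairwise_cons.mp h).1 b (List.mem_cons_self ..)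
        have hbz : b ≤ z := (List.pairwise_cons.mp h.tail).1 z hzt
        exact lt_of_lt_of_le (lt_of_le_of_ne hb hab) hbz

lemma dedupAdjacent_head (y : String) (t : List String) :
    dedupAdjacent (y :: t) = y :: (dedupAdjacent (y :: t)).tail := by
  induction t generalizing y with
  | nil => rfl
  | cons z t ih =>
      by_cases hyz : y = z
      · rw [dedupAdjacent, if_pos hyz, hyz, ← ih]
      · rw [dedupAdjacent, if_neg hyz]
        rfl

lemma fold_dedupStep_tail (t : List String) (x : String) (acc : List String) :
    t.foldl dedupStep (acc ++ [x]) = (acc ++ [x]) ++ (dedupAdjacent (x :: t)).tail := by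
  induction t generalizing x acc with
  | nil => simp [dedupAdjacent]
  | cons y t ih =>
      rw [List.foldl_cons]
      by_cases hxy : x = y
      · have hstep : dedupStep (acc ++ [x]) y = acc ++ [x] := by
          simp [dedupStep, hxy]
        rw [hstep, ih]
        have : dedupAdjacent (x :: y :: t) = dedupAdjacent (x :: t) := by
          rw [dedupAdjacent, if_pos hxy, hxy]
        rw [this]
      · have hstep : dedupStep (acc ++ [x]) y = (acc ++ [x]) ++ [y] := by
          simp [dedupStep, hxy]
        rw [hstep, ih]
        have : dedupAdjacent (x :: y :: t) = x :: dedupAdjacent (y :: t) := by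
          rw [dedupAdjacent, if_neg hxy]
        rw [this, List.tail_cons, dedupAdjacent_head y t]
        simp

lemma fold_dedupStep_eq (l : List String) :
    l.foldl dedupStep [] = dedupAdjacent l := by
  cases l with
  | nil => rfl
  | cons x t =>
      rw [List.foldl_cons]
      have hstep : dedupStep [] x = [] ++ [x] := by simp [dedupStep]
      rw [hstep, fold_dedupStep_tail, dedupAdjacent_head x t]
      simp

lemma main_lemma (L : List String) :
    PySem.List.sorted (PySem.Set.ofList L) (fun x => x) false
      = (PySem.List.sorted L (fun x => x) false).foldl dedupStep [] := by
  rw [fold_dedupStep_eq]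
  have hpw : (dedupAdjacent (PySem.List.sorted L (fun x => x) false)).Pairwise (· < ·) :=
    pairwise_lt_dedupAdjacent _ (PySem.List.sorted_pairwise L (fun x => x))
  apply PySem.List.sorted_eq_of_perm_of_pairwise_lt
  · refine (List.perm_ext_iff_of_nodup (hpw.imp ne_of_lt) (PySem.Set.nodup_ofList L)).mpr ?_
    intro a
    rw [mem_dedupAdjacent, PySem.List.mem_sorted, PySem.Set.mem_ofList]
  · exact hpw

-- ===== VERDICT (by name: the statement is the Claim_ definition above) =====
theorem unique_colors_spec : Claim_equal_unique_colors := by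
  intro data _
  unfold Spec_unique_colors unique_colors unique_colors_alt
  rw [a_outer, b_outer]
  have h : PySem.Set.update PySem.Set.empty (data.flatMap pvParts)
      = PySem.Set.ofList (data.flatMap pvParts) := rfl
  rw [List.nil_append, h, main_lemma]
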